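-- pv_equiv track=rewrite | github.com/mmuffins/artist-resolver-api | Frontend/TrackManager.py | parse_simple_artist_franchise
-- ===== SOURCE A (Python) =====
-- def parse_simple_artist_franchise(track_product, track_album_artist, product_list: dict) -> dict:
-- 	"""
-- 	Determines correct product for an artist based on a product list
-- 	"""
--
-- 	product = {"id": None, "name": None}
--
-- 	if track_product:
-- 		product["name"] = track_product
-- 	elif track_album_artist:
-- 		product["name"] = track_album_artist
-- 	else:
-- 		# the default product indicating that the track doesn't belong to a franchise is _
-- 		product["name"] = "_"
--
-- 	resolved_product = [p for p in product_list if p["name"] == product["name"]]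
--
-- 	if resolved_product:
-- 		return resolved_product[0]
--
-- 	default_product = [p for p in product_list if p["name"] == "_"]
--
-- 	return default_product[0]
-- ===== SOURCE B (Python) =====
-- def parse_simple_artist_franchise(track_product, track_album_artist, product_list: dict) -> dict:
--     # Single pass: remember the first product matching the resolved name and the
--     # first default ("_") product; pick the match, else the default.
--     name = track_product or track_album_artist or "_"
--     match = None
--     default = None
--     for p in product_list:
--         n = p["name"]
--         if match is None and n == name:
--             match = p
--         if default is None and n == "_":
--             default = p
--     if match is not None:
--         return match
--     return default
-- ===== Notes on version B (the rewrite author's own statement) =====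
-- stated objective: alternative
-- what changed: Replaces the two full filtering comprehensions (one per candidate name, each building a list and then indexing [0]) by a single pass over product_list that keeps the first-seen matching product and the first-seen default ('_') product.
import Mathlib
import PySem

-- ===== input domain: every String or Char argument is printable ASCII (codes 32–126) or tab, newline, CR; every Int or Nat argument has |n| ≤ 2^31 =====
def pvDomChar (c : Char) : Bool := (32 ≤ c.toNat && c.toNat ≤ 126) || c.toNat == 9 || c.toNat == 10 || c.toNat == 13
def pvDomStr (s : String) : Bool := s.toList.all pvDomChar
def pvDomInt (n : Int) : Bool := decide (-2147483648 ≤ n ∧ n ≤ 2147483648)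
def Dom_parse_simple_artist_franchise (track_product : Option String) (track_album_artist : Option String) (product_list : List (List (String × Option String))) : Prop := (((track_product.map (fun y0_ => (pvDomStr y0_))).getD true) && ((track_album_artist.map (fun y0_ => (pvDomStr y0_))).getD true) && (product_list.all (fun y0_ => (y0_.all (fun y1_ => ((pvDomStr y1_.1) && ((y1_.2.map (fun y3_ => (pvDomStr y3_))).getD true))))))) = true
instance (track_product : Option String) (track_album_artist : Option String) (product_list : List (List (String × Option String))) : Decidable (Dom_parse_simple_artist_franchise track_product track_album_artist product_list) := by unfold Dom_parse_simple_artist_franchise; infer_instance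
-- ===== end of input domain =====

-- B replaces A's two filtering passes (match list, then default list) by one scan
-- keeping the first-seen match and first-seen default: a different single-pass decomposition.
-- Pre_ excludes exactly the inputs where A raises (a product without a "name" key -> KeyError;
-- no match and no "_" default -> IndexError).


-- ===== PORT A =====
-- p["name"]: first-match association-list lookup (none = KeyError, excluded by Pre_)
def pvNameA (p : List (String × Option String)) : Option (Option String) :=
  (p.find? (fun kv => kv.1 == "name")).map (·.2)

-- the if/elif/else chain setting product["name"] (Python truthiness: None and "" are falsy)
def pvProductNameA (track_product track_album_artist : Option String) : String :=
  match track_product with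
  | some s =>
    if s ≠ "" then s
    else match track_album_artist with
         | some t => if t ≠ "" then t else "_"
         | none => "_"
  | none =>
    match track_album_artist with
    | some t => if t ≠ "" then t else "_"
    | none => "_"

def parse_simple_artist_franchise (track_product : Option String) (track_album_artist : Option String) (product_list : List (List (String × Option String))) : List (String × Option String) :=
  let pname := pvProductNameA track_product track_album_artist
  let resolved_product := product_list.filter (fun p => pvNameA p == some (some pname))
  match resolved_product with
  | r :: _ => r
  | [] =>
    let default_product := product_list.filter (fun p => pvNameA p == some (some "_"))
    default_product.headD []   -- default_product[0]; [] is junk, A raises IndexError there (outside Pre_)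

-- ===== PORT B =====
-- name = track_product or track_album_artist or "_"
def pvOrStr (o : Option String) (d : String) : String :=
  match o with
  | some s => if s = "" then d else s
  | none => d

-- loop body: first-seen match / first-seen default
def pvStepB (name : String) (st : Option (List (String × Option String)) × Option (List (String × Option String))) (p : List (String × Option String)) : Option (List (String × Option String)) × Option (List (String × Option String)) :=
  let n := pvNameA p
  ( if st.1 = none ∧ n == some (some name) then some p else st.1,
    if st.2 = none ∧ n == some (some "_") then some p else st.2 )

def parse_simple_artist_franchise_alt (track_product : Option String) (track_album_artist : Option String) (product_list : List (List (String × Option String))) : List (String × Option String) :=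
  let name := pvOrStr track_product (pvOrStr track_album_artist "_")
  let st := product_list.foldl (pvStepB name) (none, none)
  match st.1 with
  | some m => m
  | none => st.2.getD []   -- Source B returns default (None when absent; outside Pre_)

-- ===== PRECONDITION & SPEC =====
-- target-name computation repeated standalone so Pre_'s closure does not reach either port
def pvTargetName (track_product track_album_artist : Option String) : String :=
  match track_product with
  | some s => if s = "" then (match track_album_artist with | some t => if t = "" then "_" else t | none => "_") else s
  | none => match track_album_artist with | some t => if t = "" then "_" else t | none => "_"

-- exactly the inputs on which A returns: every product has a "name" key (else KeyError)
-- and some product carries the target name or the default name "_" (else IndexError)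
def Pre_parse_simple_artist_franchise (track_product : Option String) (track_album_artist : Option String) (product_list : List (List (String × Option String))) : Prop :=
  (∀ p ∈ product_list, (p.find? (fun kv => kv.1 == "name")).isSome = true) ∧
  (product_list.any (fun p =>
      ((p.find? (fun kv => kv.1 == "name")).map (·.2) == some (some (pvTargetName track_product track_album_artist))) ||
      ((p.find? (fun kv => kv.1 == "name")).map (·.2) == some (some "_"))) = true)
instance (track_product : Option String) (track_album_artist : Option String) (product_list : List (List (String × Option String))) : Decidable (Pre_parse_simple_artist_franchise track_product track_album_artist product_list) := by unfold Pre_parse_simple_artist_franchise; infer_instance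

def pvWitness_parse_simple_artist_franchise : Option String × Option String × (List (List (String × Option String))) :=
  (some "x", none, [[("name", some "_")], [("name", some "x"), ("id", some "1")]])

def Spec_parse_simple_artist_franchise (track_product : Option String) (track_album_artist : Option String) (product_list : List (List (String × Option String))) (out : List (String × Option String)) : Prop := out = parse_simple_artist_franchise_alt track_product track_album_artist product_list
instance (track_product : Option String) (track_album_artist : Option String) (product_list : List (List (String × Option String))) (out : List (String × Option String)) : Decidable (Spec_parse_simple_artist_franchise track_product track_album_artist product_list out) := by unfold Spec_parse_simple_artist_franchise; infer_instance

-- ===== CLAIM (what is proved, stated in full; the proofs are below) =====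
def Claim_equal_parse_simple_artist_franchise : Prop := ∀ (track_product : Option String) (track_album_artist : Option String) (product_list : List (List (String × Option String))), Dom_parse_simple_artist_franchise track_product track_album_artist product_list → Pre_parse_simple_artist_franchise track_product track_album_artist product_list → Spec_parse_simple_artist_franchise track_product track_album_artist product_list (parse_simple_artist_franchise track_product track_album_artist product_list)

-- ===== LEMMAS AND PROOFS =====

-- the two target-name computations agree
theorem pvName_eq (tp ta : Option String) :
    pvProductNameA tp ta = pvOrStr tp (pvOrStr ta "_") := by
  cases tp <;> cases ta <;> simp [pvProductNameA, pvOrStr]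

-- head of a filtered list is find?
theorem head?_filter_eq_find? {α : Type} (P : α → Bool) (l : List α) :
    (l.filter P).head? = l.find? P := by
  induction l with
  | nil => rfl
  | cons x xs ih => by_cases h : P x <;> simp [h, ih]

-- the single fold computes (find? of the match predicate, find? of the default predicate)
theorem foldl_pvStepB (name : String) (l : List (List (String × Option String)))
    (m d : Option (List (String × Option String))) :
    l.foldl (pvStepB name) (m, d) =
      (m.orElse (fun _ => l.find? (fun p => pvNameA p == some (some name))),
       d.orElse (fun _ => l.find? (fun p => pvNameA p == some (some "_")))) := by
  induction l generalizing m d with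
  | nil => cases m <;> cases d <;> rfl
  | cons x xs ih =>
    simp only [List.foldl_cons, List.find?_cons]
    cases m <;> cases d <;>
      by_cases h1 : (pvNameA x == some (some name)) = true <;>
      by_cases h2 : (pvNameA x == some (some "_")) = true <;>
      simp [pvStepB, h1, h2, ih]

-- ===== VERDICT (by name: the statement is the Claim_ definition above) =====
theorem parse_simple_artist_franchise_spec : Claim_equal_parse_simple_artist_franchise := by
  intro tp ta pl _ _
  unfold Spec_parse_simple_artist_franchise parse_simple_artist_franchise parse_simple_artist_franchise_alt
  rw [← pvName_eq]
  simp only [foldl_pvStepB, Option.orElse, pvNameA, pvNameA]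
  rw [← head?_filter_eq_find?, ← head?_filter_eq_find?]
  cases h : (pl.filter (fun p => (p.find? (fun kv => kv.1 == "name")).map (·.2) == some (some (pvProductNameA tp ta)))) with
  | nil => simp [List.headD_eq_head?_getD]
  | cons r rs => simp
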